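-- pv_equiv track=rewrite | github.com/nazmi-abd-ghani-intel/projects | FFRCheck.py | _process_paired_fuse_data_fast
-- ===== SOURCE A (Python) =====
-- from typing import List, Dict, Any, Tuple, Optional, Set, Generator
--
-- def _process_paired_fuse_data_fast(fuse_name_original: str, fuse_register_original: str, field_name: str) -> List[Dict[str, str]]:
--     if not fuse_name_original and not fuse_register_original:
--         return [{'fuse_name': '', 'fuse_register': ''}]
--
--     fuse_names = [name.strip() for name in fuse_name_original.split(',') if name.strip()] if fuse_name_original else ['']
--     fuse_registers = [reg.strip() for reg in fuse_register_original.split(',') if reg.strip()] if fuse_register_original else ['']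
--
--     len_names, len_regs = len(fuse_names), len(fuse_registers)
--
--     if len_names == len_regs and len_names > 1:
--         paired_data = [{'fuse_name': name, 'fuse_register': reg} for name, reg in zip(fuse_names, fuse_registers)]
--     elif len_names > 1 and len_regs == 1:
--         paired_data = [{'fuse_name': name, 'fuse_register': fuse_registers[0]} for name in fuse_names]
--     elif len_names == 1 and len_regs > 1:
--         paired_data = [{'fuse_name': fuse_names[0], 'fuse_register': reg} for reg in fuse_registers]
--     elif len_names > 1 and len_regs > 1 and len_names != len_regs:
--         min_count = min(len_names, len_regs)
--         paired_data = [{'fuse_name': fuse_names[i], 'fuse_register': fuse_registers[i]} for i in range(min_count)]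
--
--         if len_names > min_count:
--             last_register = fuse_registers[-1]
--             for i in range(min_count, len_names):
--                 paired_data.append({'fuse_name': fuse_names[i], 'fuse_register': last_register})
--         elif len_regs > min_count:
--             last_name = fuse_names[-1]
--             for i in range(min_count, len_regs):
--                 paired_data.append({'fuse_name': last_name, 'fuse_register': fuse_registers[i]})
--     else:
--         paired_data = [{'fuse_name': fuse_names[0] if fuse_names else '', 'fuse_register': fuse_registers[0] if fuse_registers else ''}]
--
--     return paired_data
-- ===== SOURCE B (Python) =====
-- def _process_paired_fuse_data_fast(fuse_name_original: str, fuse_register_original: str, field_name: str):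
--     if not fuse_name_original and not fuse_register_original:
--         return [{'fuse_name': '', 'fuse_register': ''}]
--
--     fuse_names = [name.strip() for name in fuse_name_original.split(',') if name.strip()] if fuse_name_original else ['']
--     fuse_registers = [reg.strip() for reg in fuse_register_original.split(',') if reg.strip()] if fuse_register_original else ['']
--
--     if not fuse_names or not fuse_registers:
--         return [{'fuse_name': fuse_names[0] if fuse_names else '',
--                  'fuse_register': fuse_registers[0] if fuse_registers else ''}]
--
--     n = max(len(fuse_names), len(fuse_registers))
--     return [{'fuse_name': fuse_names[min(i, len(fuse_names) - 1)],
--              'fuse_register': fuse_registers[min(i, len(fuse_registers) - 1)]}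
--             for i in range(n)]
-- ===== Notes on version B (the rewrite author's own statement) =====
-- stated objective: simpler
-- what changed: A's five zip/broadcast/min-then-pad branches are replaced by one empty-list guard plus a single clamped-index comprehension over range(max(len_names, len_regs)).
import Mathlib
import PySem

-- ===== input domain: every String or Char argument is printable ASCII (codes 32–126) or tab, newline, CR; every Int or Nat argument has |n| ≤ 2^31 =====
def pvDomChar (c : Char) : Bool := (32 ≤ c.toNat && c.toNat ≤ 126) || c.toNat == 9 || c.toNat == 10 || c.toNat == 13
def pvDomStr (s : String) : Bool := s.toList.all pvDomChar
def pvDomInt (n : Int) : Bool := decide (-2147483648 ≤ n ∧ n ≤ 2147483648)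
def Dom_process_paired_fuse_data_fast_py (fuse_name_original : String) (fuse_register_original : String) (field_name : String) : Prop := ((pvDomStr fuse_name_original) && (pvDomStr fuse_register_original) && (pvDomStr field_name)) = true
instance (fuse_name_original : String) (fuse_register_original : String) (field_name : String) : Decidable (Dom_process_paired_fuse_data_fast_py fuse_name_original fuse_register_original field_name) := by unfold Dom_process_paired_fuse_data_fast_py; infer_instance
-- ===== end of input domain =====

-- B replaces A's five pairing branches by one clamped-index pass; objective: simpler.
-- Both Pythons compute the cleaned lists with the same line; both ports share this helper.
-- '[x.strip() for x in s.split(",") if x.strip()] if s else [""]'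
def pvClean (s : String) : List String :=
  if s = "" then [""]
  else -- split? s "," = some _ since the separator is nonempty
  (((PySem.Str.split? s ",").getD []).map PySem.Str.strip).filter (fun t => decide (t ≠ ""))

-- ===== PORT A =====
-- literal port of A.  Python indexing fuse_registers[0], fuse_names[-1] … is always in
-- range in its branch, and 'fuse_names[0] if fuse_names else ""' is List.getD 0 "",
-- so List.getD is exact here; range(m, k) over Nat bounds m ≤ k is List.range' m (k - m).
def process_paired_fuse_data_fast_py (fuse_name_original : String) (fuse_register_original : String) (field_name : String) : List (List (String × String)) :=
  if fuse_name_original = "" ∧ fuse_register_original = "" then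
    [[("fuse_name", ""), ("fuse_register", "")]]
  else
    let ns := pvClean fuse_name_original
    let rs := pvClean fuse_register_original
    let len_names := ns.length
    let len_regs := rs.length
    if len_names = len_regs ∧ len_names > 1 then
      (ns.zip rs).map (fun p => [("fuse_name", p.1), ("fuse_register", p.2)])
    else if len_names > 1 ∧ len_regs = 1 then
      ns.map (fun n => [("fuse_name", n), ("fuse_register", rs.getD 0 "")])
    else if len_names = 1 ∧ len_regs > 1 then
      rs.map (fun r => [("fuse_name", ns.getD 0 ""), ("fuse_register", r)])
    else if len_names > 1 ∧ len_regs > 1 ∧ len_names ≠ len_regs then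
      let min_count := min len_names len_regs
      let paired := (List.range min_count).map
        (fun i => [("fuse_name", ns.getD i ""), ("fuse_register", rs.getD i "")])
      if len_names > min_count then
        let last_register := rs.getD (len_regs - 1) ""
        paired ++ (List.range' min_count (len_names - min_count)).map
          (fun i => [("fuse_name", ns.getD i ""), ("fuse_register", last_register)])
      else if len_regs > min_count then
        let last_name := ns.getD (len_names - 1) ""
        paired ++ (List.range' min_count (len_regs - min_count)).map
          (fun i => [("fuse_name", last_name), ("fuse_register", rs.getD i "")])
      else paired
    else
      [[("fuse_name", ns.getD 0 ""), ("fuse_register", rs.getD 0 "")]]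

-- ===== PORT B =====
-- literal port of Source B: empty guard, then one comprehension with clamped indices.
def process_paired_fuse_data_fast_py_alt (fuse_name_original : String) (fuse_register_original : String) (field_name : String) : List (List (String × String)) :=
  if fuse_name_original = "" ∧ fuse_register_original = "" then
    [[("fuse_name", ""), ("fuse_register", "")]]
  else
    let ns := pvClean fuse_name_original
    let rs := pvClean fuse_register_original
    if ns = [] ∨ rs = [] then
      [[("fuse_name", ns.getD 0 ""), ("fuse_register", rs.getD 0 "")]]
    else
      let n := max ns.length rs.length
      (List.range n).map (fun i =>
        [("fuse_name", ns.getD (min i (ns.length - 1)) ""),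
         ("fuse_register", rs.getD (min i (rs.length - 1)) "")])

-- ===== PRECONDITION & SPEC =====
def Spec_process_paired_fuse_data_fast_py (fuse_name_original : String) (fuse_register_original : String) (field_name : String) (out : List (List (String × String))) : Prop := out = process_paired_fuse_data_fast_py_alt fuse_name_original fuse_register_original field_name
instance (fuse_name_original : String) (fuse_register_original : String) (field_name : String) (out : List (List (String × String))) : Decidable (Spec_process_paired_fuse_data_fast_py fuse_name_original fuse_register_original field_name out) := by unfold Spec_process_paired_fuse_data_fast_py; infer_instance

-- ===== CLAIM (what is proved, stated in full; the proofs are below) =====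
def Claim_equal_process_paired_fuse_data_fast_py : Prop := ∀ (fuse_name_original : String) (fuse_register_original : String) (field_name : String), Dom_process_paired_fuse_data_fast_py fuse_name_original fuse_register_original field_name → Spec_process_paired_fuse_data_fast_py fuse_name_original fuse_register_original field_name (process_paired_fuse_data_fast_py fuse_name_original fuse_register_original field_name)

-- ===== LEMMAS AND PROOFS =====

-- the A-branch and B-branch pairing expressions agree on arbitrary cleaned lists
theorem pv_pair_eq (ns rs : List String) :
    (if ns.length = rs.length ∧ ns.length > 1 then
      (ns.zip rs).map (fun p => [("fuse_name", p.1), ("fuse_register", p.2)])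
    else if ns.length > 1 ∧ rs.length = 1 then
      ns.map (fun n => [("fuse_name", n), ("fuse_register", rs.getD 0 "")])
    else if ns.length = 1 ∧ rs.length > 1 then
      rs.map (fun r => [("fuse_name", ns.getD 0 ""), ("fuse_register", r)])
    else if ns.length > 1 ∧ rs.length > 1 ∧ ns.length ≠ rs.length then
      (if ns.length > min ns.length rs.length then
        ((List.range (min ns.length rs.length)).map
          (fun i => [("fuse_name", ns.getD i ""), ("fuse_register", rs.getD i "")])) ++
        (List.range' (min ns.length rs.length) (ns.length - min ns.length rs.length)).map
          (fun i => [("fuse_name", ns.getD i ""), ("fuse_register", rs.getD (rs.length - 1) "")])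
      else if rs.length > min ns.length rs.length then
        ((List.range (min ns.length rs.length)).map
          (fun i => [("fuse_name", ns.getD i ""), ("fuse_register", rs.getD i "")])) ++
        (List.range' (min ns.length rs.length) (rs.length - min ns.length rs.length)).map
          (fun i => [("fuse_name", ns.getD (ns.length - 1) ""), ("fuse_register", rs.getD i "")])
      else
        (List.range (min ns.length rs.length)).map
          (fun i => [("fuse_name", ns.getD i ""), ("fuse_register", rs.getD i "")]))
    else
      [[("fuse_name", ns.getD 0 ""), ("fuse_register", rs.getD 0 "")]])
    =
    (if ns = [] ∨ rs = [] then
      [[("fuse_name", ns.getD 0 ""), ("fuse_register", rs.getD 0 "")]]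
    else
      (List.range (max ns.length rs.length)).map (fun i =>
        [("fuse_name", ns.getD (min i (ns.length - 1)) ""),
         ("fuse_register", rs.getD (min i (rs.length - 1)) "")])) := by
  by_cases hE : ns = [] ∨ rs = []
  · rw [if_pos hE]
    have hlen : ns.length = 0 ∨ rs.length = 0 := by
      rcases hE with h | h <;> [left; right] <;> simp [h]
    split_ifs <;> first | rfl | omega
  · have hln : 0 < ns.length := by
      rcases Nat.eq_zero_or_pos ns.length with h | h
      · exact absurd (Or.inl (List.eq_nil_of_length_eq_zero h)) hE
      · exact h
    have hlr : 0 < rs.length := by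
      rcases Nat.eq_zero_or_pos rs.length with h | h
      · exact absurd (Or.inr (List.eq_nil_of_length_eq_zero h)) hE
      · exact h
    rw [if_neg hE]
    split_ifs with h1 h2 h3 h4 h5 h6
    · -- equal lengths > 1 : zip
      apply List.ext_getElem
      · simp; omega
      · intro i hi1 hi2
        simp only [List.length_map, List.length_zip] at hi1
        simp only [List.getElem_map, List.getElem_zip, List.getElem_range]
        have e1 : min i (ns.length - 1) = i := by omega
        have e2 : min i (rs.length - 1) = i := by omega
        rw [e1, e2, List.getD_eq_getElem ns "" (by omega), List.getD_eq_getElem rs "" (by omega)]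
    · -- many names, one register
      apply List.ext_getElem
      · simp; omega
      · intro i hi1 hi2
        simp only [List.length_map] at hi1
        simp only [List.getElem_map, List.getElem_range]
        have e1 : min i (ns.length - 1) = i := by omega
        have e2 : min i (rs.length - 1) = 0 := by omega
        rw [e1, e2, List.getD_eq_getElem ns "" (by omega)]
    · -- one name, many registers
      apply List.ext_getElem
      · simp; omega
      · intro i hi1 hi2
        simp only [List.length_map] at hi1
        simp only [List.getElem_map, List.getElem_range]
        have e1 : min i (ns.length - 1) = 0 := by omega
        have e2 : min i (rs.length - 1) = i := by omega
        rw [e1, e2, List.getD_eq_getElem rs "" (by omega)]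
    · -- unequal, names longer: pad with last register
      apply List.ext_getElem
      · simp; omega
      · intro i hi1 hi2
        simp only [List.length_append, List.length_map, List.length_range,
          List.length_range'] at hi1
        simp only [List.getElem_map, List.getElem_range, List.getElem_append,
          List.length_map, List.length_range, List.getElem_range']
        split_ifs with hcase
        · have e1 : min i (ns.length - 1) = i := by omega
          have e2 : min i (rs.length - 1) = i := by omega
          rw [e1, e2]
        · have e0 : min ns.length rs.length + 1 * (i - min ns.length rs.length) = i := by omega
          have e1 : min i (ns.length - 1) = i := by omega
          have e2 : min i (rs.length - 1) = rs.length - 1 := by omega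
          rw [e0, e1, e2]
    · -- unequal, registers longer: pad with last name
      apply List.ext_getElem
      · simp; omega
      · intro i hi1 hi2
        simp only [List.length_append, List.length_map, List.length_range,
          List.length_range'] at hi1
        simp only [List.getElem_map, List.getElem_range, List.getElem_append,
          List.length_map, List.length_range, List.getElem_range']
        split_ifs with hcase
        · have e1 : min i (ns.length - 1) = i := by omega
          have e2 : min i (rs.length - 1) = i := by omega
          rw [e1, e2]
        · have e0 : min ns.length rs.length + 1 * (i - min ns.length rs.length) = i := by omega
          have e1 : min i (ns.length - 1) = ns.length - 1 := by omega
          have e2 : min i (rs.length - 1) = i := by omega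
          rw [e0, e1, e2]
    · -- unreachable: unequal lengths but neither exceeds the min
      omega
    · -- both singletons
      have hns : ns.length = 1 := by omega
      have hrs : rs.length = 1 := by omega
      apply List.ext_getElem
      · simp [hns, hrs]
      · intro i hi1 hi2
        simp only [List.length_singleton] at hi1
        interval_cases i
        simp [hns, hrs]

-- ===== VERDICT (by name: the statement is the Claim_ definition above) =====
theorem process_paired_fuse_data_fast_py_spec : Claim_equal_process_paired_fuse_data_fast_py := by
  intro fn fr field _
  unfold Spec_process_paired_fuse_data_fast_py
  unfold process_paired_fuse_data_fast_py process_paired_fuse_data_fast_py_alt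
  by_cases h : fn = "" ∧ fr = ""
  · simp [h]
  · simp only [if_neg h]
    exact pv_pair_eq (pvClean fn) (pvClean fr)
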